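-- pv_equiv track=rewrite | github.com/Ace1928/eidosian_forge | archive_forge/code/class_SwitchPort.py | bitmap_to_vlan_list
-- ===== SOURCE A (Python) =====
-- def bitmap_to_vlan_list(bitmap):
--     """convert VLAN bitmap to VLAN list"""
--     vlan_list = list()
--     if not bitmap:
--         return vlan_list
--     for i in range(len(bitmap)):
--         if bitmap[i] == '0':
--             continue
--         bit = int(bitmap[i], 16)
--         if bit & 8:
--             vlan_list.append(str(i * 4))
--         if bit & 4:
--             vlan_list.append(str(i * 4 + 1))
--         if bit & 2:
--             vlan_list.append(str(i * 4 + 2))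
--         if bit & 1:
--             vlan_list.append(str(i * 4 + 3))
--     return vlan_list
-- ===== SOURCE B (Python) =====
-- def bitmap_to_vlan_list(bitmap):
--     """convert VLAN bitmap to VLAN list"""
--     bits = ''.join(format(int(c, 16), '04b') for c in bitmap)
--     return [str(i) for i, b in enumerate(bits) if b == '1']
-- ===== Notes on version B (the rewrite author's own statement) =====
-- stated objective: simpler
-- what changed: B replaces A's index loop with a per-digit four-way branch chain by expanding the bitmap into one MSB-first binary string and collecting str(i) for every set bit position in a single enumerate pass.
import Mathlib
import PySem

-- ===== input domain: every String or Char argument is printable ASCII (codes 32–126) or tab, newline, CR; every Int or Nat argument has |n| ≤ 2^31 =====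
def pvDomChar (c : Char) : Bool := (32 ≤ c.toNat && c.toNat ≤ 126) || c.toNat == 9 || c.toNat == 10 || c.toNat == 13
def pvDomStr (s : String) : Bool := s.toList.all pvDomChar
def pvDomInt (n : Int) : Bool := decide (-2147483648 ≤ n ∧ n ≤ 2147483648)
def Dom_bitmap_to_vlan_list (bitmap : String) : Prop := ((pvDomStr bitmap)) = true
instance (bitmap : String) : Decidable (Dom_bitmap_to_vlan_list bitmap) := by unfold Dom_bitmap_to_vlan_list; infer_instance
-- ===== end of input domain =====

-- B decodes the bitmap through a single binary string and one enumerate pass instead of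
-- A's per-digit four-branch append chain; objective: simpler.

-- ===== PORT A =====
def bitmap_to_vlan_list (bitmap : String) : List String :=
  let l := bitmap.toList
  let vlan_list : List String := []
  if l = [] then vlan_list
  else
    (PySem.List.pyRange 0 (l.length : Int) 1).foldl (fun acc i =>
      match PySem.List.pyGet? l i with
      | none => acc
      | some c =>
        if c = '0' then acc
        else
          -- int(bitmap[i], 16); Pre_ guarantees it is some
          let bit := (PySem.Int.ofCharsBase? [c] 16).getD 0
          let acc := if Int.land bit 8 ≠ 0 then acc ++ [PySem.Int.toStr (i * 4)] else acc
          let acc := if Int.land bit 4 ≠ 0 then acc ++ [PySem.Int.toStr (i * 4 + 1)] else acc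
          let acc := if Int.land bit 2 ≠ 0 then acc ++ [PySem.Int.toStr (i * 4 + 2)] else acc
          if Int.land bit 1 ≠ 0 then acc ++ [PySem.Int.toStr (i * 4 + 3)] else acc) vlan_list

-- ===== PORT B =====
-- hand port of format(v, '04b'): the four binary digits MSB first; exact for 0 ≤ v < 16,
-- which is every value int(c, 16) yields on a single character
def pvBin4 (v : Int) : List Char :=
  [if Int.land v 8 ≠ 0 then '1' else '0', if Int.land v 4 ≠ 0 then '1' else '0',
   if Int.land v 2 ≠ 0 then '1' else '0', if Int.land v 1 ≠ 0 then '1' else '0']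

def bitmap_to_vlan_list_alt (bitmap : String) : List String :=
  let bits := bitmap.toList.flatMap (fun c => pvBin4 ((PySem.Int.ofCharsBase? [c] 16).getD 0))
  ((PySem.List.enumerate bits 0).filter (fun p => p.2 == '1')).map (fun p => PySem.Int.toStr p.1)

-- ===== PRECONDITION & SPEC =====
-- Pre_ excludes exactly the strings containing a non-hex character, where Python's int(c, 16)
-- raises ValueError (in both A and B).
def Pre_bitmap_to_vlan_list (bitmap : String) : Prop :=
  (bitmap.toList.all (fun c => (PySem.Int.ofCharsBase? [c] 16).isSome)) = true
instance (bitmap : String) : Decidable (Pre_bitmap_to_vlan_list bitmap) := by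
  unfold Pre_bitmap_to_vlan_list; infer_instance
def pvWitness_bitmap_to_vlan_list : String := "f0A1"

def Spec_bitmap_to_vlan_list (bitmap : String) (out : List String) : Prop := out = bitmap_to_vlan_list_alt bitmap
instance (bitmap : String) (out : List String) : Decidable (Spec_bitmap_to_vlan_list bitmap out) := by unfold Spec_bitmap_to_vlan_list; infer_instance

-- ===== CLAIM (what is proved, stated in full; the proofs are below) =====
def Claim_equal_bitmap_to_vlan_list : Prop := ∀ (bitmap : String), Dom_bitmap_to_vlan_list bitmap → Pre_bitmap_to_vlan_list bitmap → Spec_bitmap_to_vlan_list bitmap (bitmap_to_vlan_list bitmap)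

-- ===== LEMMAS AND PROOFS =====

-- canonical per-digit contribution list, shared target of both directions
def pvCanon : List Char → Int → List String
  | [], _ => []
  | c :: cs, i =>
    let v := (PySem.Int.ofCharsBase? [c] 16).getD 0
    ((if Int.land v 8 ≠ 0 then [PySem.Int.toStr (i * 4)] else []) ++
     (if Int.land v 4 ≠ 0 then [PySem.Int.toStr (i * 4 + 1)] else []) ++
     (if Int.land v 2 ≠ 0 then [PySem.Int.toStr (i * 4 + 2)] else []) ++
     (if Int.land v 1 ≠ 0 then [PySem.Int.toStr (i * 4 + 3)] else [])) ++ pvCanon cs (i + 1)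

theorem pvA_enum (cs : List Char) (s : Int) (acc : List String) :
    (PySem.List.enumerate cs s).foldl (fun acc (p : Int × Char) =>
      if p.2 = '0' then acc
      else
        let bit := (PySem.Int.ofCharsBase? [p.2] 16).getD 0
        let acc := if Int.land bit 8 ≠ 0 then acc ++ [PySem.Int.toStr (p.1 * 4)] else acc
        let acc := if Int.land bit 4 ≠ 0 then acc ++ [PySem.Int.toStr (p.1 * 4 + 1)] else acc
        let acc := if Int.land bit 2 ≠ 0 then acc ++ [PySem.Int.toStr (p.1 * 4 + 2)] else acc
        if Int.land bit 1 ≠ 0 then acc ++ [PySem.Int.toStr (p.1 * 4 + 3)] else acc) acc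
    = acc ++ pvCanon cs s := by
  induction cs generalizing s acc with
  | nil => simp [PySem.List.enumerate_nil, pvCanon]
  | cons c cs ih =>
    rw [PySem.List.enumerate_cons, List.foldl_cons, ih]
    simp only [pvCanon]
    by_cases h0 : c = '0'
    · subst h0
      simp [show (PySem.Int.ofCharsBase? ['0'] 16).getD 0 = 0 from by decide,
        show Int.land 0 8 = 0 from by decide, show Int.land 0 4 = 0 from by decide,
        show Int.land 0 2 = 0 from by decide, show Int.land 0 1 = 0 from by decide]
    · simp only [h0, if_false]
      split_ifs <;> simp
theorem pvB_canon (cs : List Char) (i : Int) :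
    ((PySem.List.enumerate (cs.flatMap (fun c => pvBin4 ((PySem.Int.ofCharsBase? [c] 16).getD 0))) (4 * i)).filter
        (fun p => p.2 == '1')).map (fun p => PySem.Int.toStr p.1)
    = pvCanon cs i := by
  induction cs generalizing i with
  | nil => simp [pvCanon]
  | cons c cs ih =>
    rw [List.flatMap_cons, PySem.List.enumerate_append, List.filter_append, List.map_append]
    have hlen : (pvBin4 ((PySem.Int.ofCharsBase? [c] 16).getD 0)).length = 4 := by
      simp [pvBin4]
    rw [hlen]
    have h4 : (4 : Int) * i + (4 : Nat) = 4 * (i + 1) := by push_cast; ring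
    rw [h4, ih]
    simp only [pvCanon]
    congr 1
    simp only [pvBin4, PySem.List.enumerate_cons, PySem.List.enumerate_nil]
    have e1 : 4 * i = i * 4 := by ring
    split_ifs <;>
      simp [List.filter, e1, show i * 4 + 1 + 1 = i * 4 + 2 from by ring,
        show i * 4 + 2 + 1 = i * 4 + 3 from by ring]

-- bridge: A's pyRange/pyGet? loop is the fold over enumerate
theorem pvA_bridge (l : List Char) (f : List String → Int → Char → List String) (init : List String) :
    (PySem.List.pyRange 0 (l.length : Int) 1).foldl (fun acc i =>
      match PySem.List.pyGet? l i with
      | none => acc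
      | some c => f acc i c) init
    = (PySem.List.enumerate l 0).foldl (fun acc p => f acc p.1 p.2) init := by
  rw [PySem.List.enumerate_eq_map_pyRange (d := ' '), List.foldl_map]
  apply PySem.List.foldl_congr_mem
  intro acc x hx
  have hb := (PySem.List.mem_pyRange_one.mp hx)
  have hget := PySem.List.pyGet?_eq_some_getElem (xs := l) hb.1 (by simpa using hb.2)
  simp only [hget]
  simp [PySem.List.pyGetD_of_nonneg _ _ hb.1, List.getD,
    List.getElem?_eq_getElem (show x.toNat < l.length by omega)]

-- ===== VERDICT (by name: the statement is the Claim_ definition above) =====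
theorem bitmap_to_vlan_list_spec : Claim_equal_bitmap_to_vlan_list := by
  intro bitmap _ _
  unfold Spec_bitmap_to_vlan_list bitmap_to_vlan_list bitmap_to_vlan_list_alt
  by_cases h : bitmap.toList = []
  · simp [h]
  · simp only [h, if_false]
    rw [pvA_bridge bitmap.toList (fun acc i c =>
      if c = '0' then acc
      else
        let bit := (PySem.Int.ofCharsBase? [c] 16).getD 0
        let acc := if Int.land bit 8 ≠ 0 then acc ++ [PySem.Int.toStr (i * 4)] else acc
        let acc := if Int.land bit 4 ≠ 0 then acc ++ [PySem.Int.toStr (i * 4 + 1)] else acc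
        let acc := if Int.land bit 2 ≠ 0 then acc ++ [PySem.Int.toStr (i * 4 + 2)] else acc
        if Int.land bit 1 ≠ 0 then acc ++ [PySem.Int.toStr (i * 4 + 3)] else acc) []]
    rw [pvA_enum, ← pvB_canon bitmap.toList 0]
    norm_num
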